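-- pv_equiv track=rewrite | github.com/emilejacquard/bbase | test/create_ints.py | bar_to_rank
-- ===== SOURCE A (Python) =====
-- def bar_to_rank(bar,l):
--     r = {(i, j): 0 for i in range(l + 1) for j in range(i + 1, l + 1)}
--     for a in range(l + 1):
--         for b in range(a + 1, l + 1):
--             for x, y in bar:
--                 if x <= a and y >= b:
--                     r[a, b] += bar[x, y]
--     return r
-- ===== SOURCE B (Python) =====
-- def bar_to_rank(bar, l):
--     # 2D cumulative sums: clamp each bar onto an (x, y) grid cell, then build the
--     # rectangle sums s[a, b] = sum over x <= a, y >= b by inclusion-exclusion.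
--     g = {}
--     for (x, y), v in bar.items():
--         if x <= l and y >= 1:
--             k = (max(x, 0), min(y, l))
--             g[k] = g.get(k, 0) + v
--     s = {}
--     for a in range(l + 1):
--         for b in range(l, a, -1):
--             s[a, b] = (g.get((a, b), 0) + s.get((a, b + 1), 0)
--                        + s.get((a - 1, b), 0) - s.get((a - 1, b + 1), 0))
--     return {(a, b): s[a, b] for a in range(l + 1) for b in range(a + 1, l + 1)}
-- ===== Notes on version B (the rewrite author's own statement) =====
-- stated objective: alternative
-- what changed: replaces the triple loop (for every pair (a,b) rescan all bars) by clamping each bar onto a grid once and building 2D cumulative rectangle sums s[a,b] by inclusion-exclusion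
import Mathlib
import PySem

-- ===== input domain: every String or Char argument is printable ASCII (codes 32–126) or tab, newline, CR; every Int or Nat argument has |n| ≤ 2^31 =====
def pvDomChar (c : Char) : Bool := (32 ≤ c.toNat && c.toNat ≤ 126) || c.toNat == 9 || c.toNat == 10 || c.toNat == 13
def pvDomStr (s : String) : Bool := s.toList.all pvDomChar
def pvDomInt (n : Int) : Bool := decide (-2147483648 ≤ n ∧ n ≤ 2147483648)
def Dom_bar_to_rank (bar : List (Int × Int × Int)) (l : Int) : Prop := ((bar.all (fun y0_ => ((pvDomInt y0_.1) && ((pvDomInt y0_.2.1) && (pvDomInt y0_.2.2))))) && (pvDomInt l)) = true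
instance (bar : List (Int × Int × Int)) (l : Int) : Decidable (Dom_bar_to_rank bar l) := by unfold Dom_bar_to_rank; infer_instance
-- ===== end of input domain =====

-- B replaces A's triple loop by one clamped grid plus 2D cumulative rectangle sums (a different algorithm; a timing run measured no speed-up on its input family).
-- Both Pythons receive `bar` as a dict keyed by (x, y); the List argument is materialized into a
-- PySem.Dict first in both ports, exactly as the harness builds the Python dict.

-- ===== PORT A =====
def bar_to_rank (bar : List (Int × Int × Int)) (l : Int) : List (Int × Int × Int) :=
  let d : PySem.Dict (Int × Int) Int := PySem.Dict.ofList (bar.map (fun t => ((t.1, t.2.1), t.2.2)))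
  -- r = {(i, j): 0 for i in range(l + 1) for j in range(i + 1, l + 1)}
  let r0 : PySem.Dict (Int × Int) Int := PySem.Dict.ofList
    ((PySem.List.pyRange 0 (l + 1) 1).flatMap (fun i =>
      (PySem.List.pyRange (i + 1) (l + 1) 1).map (fun j => ((i, j), (0 : Int)))))
  -- nested loops; `bar[x, y]` is a lookup of a key that is present (it came from `bar` itself)
  let r := (PySem.List.pyRange 0 (l + 1) 1).foldl (fun r a =>
    (PySem.List.pyRange (a + 1) (l + 1) 1).foldl (fun r b =>
      d.keys.foldl (fun r k =>
        if k.1 ≤ a ∧ k.2 ≥ b then r.modify (a, b) 0 (fun w => w + d.getD k 0) else r) r) r) r0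
  r.items.map (fun p => (p.1.1, p.1.2, p.2))

-- ===== PORT B =====
def bar_to_rank_alt (bar : List (Int × Int × Int)) (l : Int) : List (Int × Int × Int) :=
  let d : PySem.Dict (Int × Int) Int := PySem.Dict.ofList (bar.map (fun t => ((t.1, t.2.1), t.2.2)))
  -- clamp each bar onto a grid cell: g[k] = g.get(k, 0) + v
  let g : PySem.Dict (Int × Int) Int := d.items.foldl (fun g p =>
    if p.1.1 ≤ l ∧ p.1.2 ≥ 1 then
      g.insert (max p.1.1 0, min p.1.2 l) (g.getD (max p.1.1 0, min p.1.2 l) 0 + p.2)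
    else g) PySem.Dict.empty
  -- s[a, b] = g.get((a,b),0) + s.get((a,b+1),0) + s.get((a-1,b),0) - s.get((a-1,b+1),0)
  let s : PySem.Dict (Int × Int) Int := (PySem.List.pyRange 0 (l + 1) 1).foldl (fun s a =>
    (PySem.List.pyRange l a (-1)).foldl (fun s b =>
      s.insert (a, b) (g.getD (a, b) 0 + s.getD (a, b + 1) 0 + s.getD (a - 1, b) 0
        - s.getD (a - 1, b + 1) 0)) s) PySem.Dict.empty
  -- {(a, b): s[a, b] for ...}: the comprehension's keys are distinct and s[a,b] is present, so the
  -- resulting dict's items are exactly this list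
  (PySem.List.pyRange 0 (l + 1) 1).flatMap (fun a =>
    (PySem.List.pyRange (a + 1) (l + 1) 1).map (fun b => (a, b, s.getD (a, b) 0)))

-- ===== PRECONDITION & SPEC =====
def Spec_bar_to_rank (bar : List (Int × Int × Int)) (l : Int) (out : List (Int × Int × Int)) : Prop := out = bar_to_rank_alt bar l
instance (bar : List (Int × Int × Int)) (l : Int) (out : List (Int × Int × Int)) : Decidable (Spec_bar_to_rank bar l out) := by unfold Spec_bar_to_rank; infer_instance

-- ===== CLAIM (what is proved, stated in full; the proofs are below) =====
def Claim_equal_bar_to_rank : Prop := ∀ (bar : List (Int × Int × Int)) (l : Int), Dom_bar_to_rank bar l → Spec_bar_to_rank bar l (bar_to_rank bar l)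

-- ===== LEMMAS AND PROOFS =====

-- the dict the harness passes to both Pythons
def dOf (bar : List (Int × Int × Int)) : PySem.Dict (Int × Int) Int :=
  PySem.Dict.ofList (bar.map (fun t => ((t.1, t.2.1), t.2.2)))

-- the rectangle-indicator b ≤ y ∧ x ≤ a (A's test `x <= a and y >= b`)
def cellC (a b : Int) (k : Int × Int) : Bool := decide (k.1 ≤ a ∧ k.2 ≥ b)

-- weighted sum of an items list against a key predicate
def wsum (L : List ((Int × Int) × Int)) (c : (Int × Int) → Bool) : Int :=
  (L.map (fun p => if c p.1 then p.2 else 0)).sum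

-- the value A accumulates at pair (a, b)
def SS (bar : List (Int × Int × Int)) (a b : Int) : Int := wsum (dOf bar).items (cellC a b)

def keyOf (l : Int) (p : (Int × Int) × Int) : Int × Int := (max p.1.1 0, min p.1.2 l)

-- B's grid dict g (if-form, definitionally the port's fold)
def gOf (bar : List (Int × Int × Int)) (l : Int) : PySem.Dict (Int × Int) Int :=
  (dOf bar).items.foldl (fun g p =>
    if p.1.1 ≤ l ∧ p.1.2 ≥ 1 then
      g.insert (max p.1.1 0, min p.1.2 l) (g.getD (max p.1.1 0, min p.1.2 l) 0 + p.2)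
    else g) PySem.Dict.empty

-- rectangle sums of the grid
def TT (bar : List (Int × Int × Int)) (l a b : Int) : Int := wsum (gOf bar l).items (cellC a b)

-- B's cumulative dict s
def sOf (bar : List (Int × Int × Int)) (l : Int) : PySem.Dict (Int × Int) Int :=
  (PySem.List.pyRange 0 (l + 1) 1).foldl (fun s a =>
    (PySem.List.pyRange l a (-1)).foldl (fun s b =>
      s.insert (a, b) ((gOf bar l).getD (a, b) 0 + s.getD (a, b + 1) 0 + s.getD (a - 1, b) 0
        - s.getD (a - 1, b + 1) 0)) s) PySem.Dict.empty

-- the pair list (i, j), 0 ≤ i < j ≤ l, in A's (and B's) enumeration order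
def pairsL (l : Int) : List (Int × Int) :=
  (PySem.List.pyRange 0 (l + 1) 1).flatMap (fun i =>
    (PySem.List.pyRange (i + 1) (l + 1) 1).map (fun j => (i, j)))

-- A's initial dict r0
def r0Of (l : Int) : PySem.Dict (Int × Int) Int :=
  PySem.Dict.ofList ((PySem.List.pyRange 0 (l + 1) 1).flatMap (fun i =>
    (PySem.List.pyRange (i + 1) (l + 1) 1).map (fun j => ((i, j), (0 : Int)))))

-- A's inner (bar) loop at pair (a, b)
def aStep (bar : List (Int × Int × Int)) (r : PySem.Dict (Int × Int) Int) (a b : Int) :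
    PySem.Dict (Int × Int) Int :=
  (dOf bar).keys.foldl (fun r k =>
    if k.1 ≤ a ∧ k.2 ≥ b then r.modify (a, b) 0 (fun w => w + (dOf bar).getD k 0) else r) r

def rOf (bar : List (Int × Int × Int)) (l : Int) : PySem.Dict (Int × Int) Int :=
  (PySem.List.pyRange 0 (l + 1) 1).foldl (fun r a =>
    (PySem.List.pyRange (a + 1) (l + 1) 1).foldl (fun r b => aStep bar r a b) r) (r0Of l)

theorem portA_eq (bar : List (Int × Int × Int)) (l : Int) :
    bar_to_rank bar l = (rOf bar l).items.map (fun p => (p.1.1, p.1.2, p.2)) := rfl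

theorem portB_eq (bar : List (Int × Int × Int)) (l : Int) :
    bar_to_rank_alt bar l = (PySem.List.pyRange 0 (l + 1) 1).flatMap (fun a =>
      (PySem.List.pyRange (a + 1) (l + 1) 1).map (fun b => (a, b, (sOf bar l).getD (a, b) 0))) := rfl

theorem pairsL_nodup (l : Int) : (pairsL l).Nodup := by
  unfold pairsL
  rw [List.nodup_flatMap]
  constructor
  · intro i _
    refine List.Nodup.map ?_ (PySem.List.nodup_pyRange_one _ _)
    intro a b h
    simpa using congrArg Prod.snd h
  · refine (PySem.List.pairwise_lt_pyRange_one 0 (l + 1)).imp ?_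
    intro i j hij p hp hq
    simp only [List.mem_map] at hp hq
    obtain ⟨x, -, rfl⟩ := hp
    obtain ⟨y, -, hy⟩ := hq
    have : j = i := by simpa using congrArg Prod.fst hy
    omega

theorem items_ofList_nodup (ps : List ((Int × Int) × Int)) (h : (ps.map Prod.fst).Nodup) :
    (PySem.Dict.ofList ps).items = ps := by
  have := PySem.Dict.items_foldl_insert_fresh ps Prod.fst Prod.snd PySem.Dict.empty
    (fun a _ => PySem.Dict.contains_empty _) h
  simpa [PySem.Dict.ofList, PySem.Dict.update, PySem.Dict.empty] using this

theorem items_r0 (l : Int) : (r0Of l).items = (pairsL l).map (fun p => (p, (0 : Int))) := by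
  have hflat : ((PySem.List.pyRange 0 (l + 1) 1).flatMap (fun i =>
      (PySem.List.pyRange (i + 1) (l + 1) 1).map (fun j => ((i, j), (0 : Int))))) =
      (pairsL l).map (fun p => (p, (0 : Int))) := by
    simp [pairsL, List.map_flatMap, List.map_map, Function.comp_def]
  rw [r0Of, hflat]
  apply items_ofList_nodup
  have : ((pairsL l).map (fun p => (p, (0 : Int)))).map Prod.fst = pairsL l := by
    simp [List.map_map, Function.comp_def]
  rw [this]
  exact pairsL_nodup l

theorem keys_r0 (l : Int) : (r0Of l).keys = pairsL l := by
  show ((r0Of l).items).map Prod.fst = pairsL l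
  rw [items_r0]
  simp [List.map_map, Function.comp_def]

theorem getD_r0 (l : Int) (q : Int × Int) : (r0Of l).getD q 0 = 0 := by
  by_cases h : (r0Of l).contains q = true
  · have hq : q ∈ (r0Of l).keys := (PySem.Dict.contains_iff_mem_keys _ _).1 h
    rw [keys_r0] at hq
    have hm : (q, (0 : Int)) ∈ (r0Of l).items := by
      rw [items_r0]; exact List.mem_map_of_mem hq
    exact PySem.Dict.getD_of_mem_items _ hm (by rw [keys_r0]; exact pairsL_nodup l) 0
  · exact PySem.Dict.getD_of_not_contains _ _ (by simpa using h)

-- sum over a filtered list versus an if-weighted sum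
theorem sum_map_filter_ite {α : Type} (q : α → Bool) (f : α → Int) (L : List α) :
    ((L.filter q).map f).sum = (L.map (fun x => if q x then f x else 0)).sum := by
  induction L with
  | nil => simp
  | cons x t ih => by_cases h : q x <;> simp [h, ih]

-- repeated `modify` at one present key adds the sum of the weights there and nothing else
theorem modFold_spec (ks : List (Int × Int)) (w : (Int × Int) → Int)
    (r : PySem.Dict (Int × Int) Int) (q : Int × Int) (h : r.contains q = true) :
    ((ks.foldl (fun r k => r.modify q 0 (fun v => v + w k)) r).keys = r.keys) ∧
    (∀ p, (ks.foldl (fun r k => r.modify q 0 (fun v => v + w k)) r).getD p 0 =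
      if p = q then r.getD q 0 + (ks.map w).sum else r.getD p 0) := by
  induction ks generalizing r with
  | nil => simp
  | cons k t ih =>
    have hc1 : (r.modify q 0 (fun v => v + w k)).contains q = true := by
      rw [PySem.Dict.contains_modify]; simp
    obtain ⟨hk, hg⟩ := ih (r.modify q 0 (fun v => v + w k)) hc1
    constructor
    · rw [List.foldl_cons, hk, PySem.Dict.keys_modify,
        PySem.Dict.keys_insert_of_contains _ _ h]
    · intro p
      rw [List.foldl_cons, hg p]
      by_cases hp : p = q
      · subst hp
        rw [if_pos rfl, if_pos rfl, PySem.Dict.getD_modify, if_pos rfl]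
        simp only [List.map_cons, List.sum_cons]
        ring
      · rw [if_neg hp, if_neg hp, PySem.Dict.getD_modify, if_neg hp]

theorem aStep_spec (bar : List (Int × Int × Int)) (r : PySem.Dict (Int × Int) Int) (a b : Int)
    (h : r.contains (a, b) = true) :
    ((aStep bar r a b).keys = r.keys) ∧
    (∀ p, (aStep bar r a b).getD p 0 =
      if p = (a, b) then r.getD (a, b) 0 + SS bar a b else r.getD p 0) := by
  unfold aStep
  rw [PySem.List.foldl_ite_eq_foldl_filter (fun k : Int × Int => k.1 ≤ a ∧ k.2 ≥ b)
      (fun (r : PySem.Dict (Int × Int) Int) (k : Int × Int) =>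
        r.modify (a, b) 0 (fun w => w + (dOf bar).getD k 0)) ((dOf bar).keys) r]
  obtain ⟨h1, h2⟩ := modFold_spec ((dOf bar).keys.filter (fun k => decide (k.1 ≤ a ∧ k.2 ≥ b)))
    (fun k => (dOf bar).getD k 0) r (a, b) h
  have hsum : (((dOf bar).keys.filter (fun k => decide (k.1 ≤ a ∧ k.2 ≥ b))).map
      (fun k => (dOf bar).getD k 0)).sum = SS bar a b := by
    rw [sum_map_filter_ite, SS, wsum,
      PySem.Dict.items_eq_map_keys (dOf bar) (PySem.Dict.nodup_keys_ofList _) 0, List.map_map]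
    rfl
  refine ⟨h1, fun p => ?_⟩
  rw [h2 p, hsum]

theorem rFold_spec (bar : List (Int × Int × Int)) (ps : List (Int × Int)) :
    ∀ (r : PySem.Dict (Int × Int) Int), ps.Nodup → (∀ p ∈ ps, r.contains p = true) →
    ((ps.foldl (fun r p => aStep bar r p.1 p.2) r).keys = r.keys) ∧
    (∀ q, (ps.foldl (fun r p => aStep bar r p.1 p.2) r).getD q 0 =
      if q ∈ ps then r.getD q 0 + SS bar q.1 q.2 else r.getD q 0) := by
  induction ps with
  | nil => intro r _ _; simp
  | cons p t ih =>
    obtain ⟨pa, pb⟩ := p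
    intro r hnd hct
    have hcp : r.contains (pa, pb) = true := hct (pa, pb) (by simp)
    obtain ⟨hk1, hg1⟩ := aStep_spec bar r pa pb hcp
    have hct' : ∀ q ∈ t, (aStep bar r pa pb).contains q = true := by
      intro q hq
      rw [PySem.Dict.contains_iff_mem_keys, hk1, ← PySem.Dict.contains_iff_mem_keys]
      exact hct q (by simp [hq])
    obtain ⟨hk2, hg2⟩ := ih (aStep bar r pa pb) (List.nodup_cons.1 hnd).2 hct'
    refine ⟨by rw [List.foldl_cons, hk2, hk1], fun q => ?_⟩
    rw [List.foldl_cons, hg2 q, hg1 q]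
    have hpt : (pa, pb) ∉ t := (List.nodup_cons.1 hnd).1
    by_cases hq1 : q ∈ t
    · have hq2 : q ≠ (pa, pb) := fun h => hpt (h ▸ hq1)
      simp [hq1, hq2]
    · by_cases hq2 : q = (pa, pb)
      · subst hq2
        simp [hq1]
      · simp [hq1, hq2]

theorem rOf_eq_fold (bar : List (Int × Int × Int)) (l : Int) :
    rOf bar l = (pairsL l).foldl (fun r p => aStep bar r p.1 p.2) (r0Of l) := by
  simp only [rOf, pairsL, List.foldl_flatMap, List.foldl_map]

theorem items_rOf (bar : List (Int × Int × Int)) (l : Int) :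
    (rOf bar l).items = (pairsL l).map (fun p => (p, SS bar p.1 p.2)) := by
  have hnd := pairsL_nodup l
  have hct : ∀ p ∈ pairsL l, (r0Of l).contains p = true := fun p hp =>
    (PySem.Dict.contains_iff_mem_keys _ _).2 (by rw [keys_r0]; exact hp)
  obtain ⟨hk, hg⟩ := rFold_spec bar (pairsL l) (r0Of l) hnd hct
  rw [rOf_eq_fold]
  have hkeys : ((pairsL l).foldl (fun r p => aStep bar r p.1 p.2) (r0Of l)).keys = pairsL l := by
    rw [hk, keys_r0]
  rw [PySem.Dict.items_eq_map_keys _ (by rw [hkeys]; exact hnd) 0, hkeys]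
  apply List.map_congr_left
  intro p hp
  rw [hg p, if_pos hp, getD_r0]
  simp

-- ---------- B side ----------

theorem gOf_eq_filter (bar : List (Int × Int × Int)) (l : Int) :
    gOf bar l = ((dOf bar).items.filter (fun p => decide (p.1.1 ≤ l ∧ p.1.2 ≥ 1))).foldl
      (fun g p => g.insert (keyOf l p) (g.getD (keyOf l p) 0 + p.2)) PySem.Dict.empty := by
  unfold gOf keyOf
  rw [PySem.List.foldl_ite_eq_foldl_filter (fun p : (Int × Int) × Int => p.1.1 ≤ l ∧ p.1.2 ≥ 1)
      (fun (g : PySem.Dict (Int × Int) Int) (p : (Int × Int) × Int) =>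
        g.insert (max p.1.1 0, min p.1.2 l) (g.getD (max p.1.1 0, min p.1.2 l) 0 + p.2))
      ((dOf bar).items) PySem.Dict.empty]

theorem gOf_nodup (bar : List (Int × Int × Int)) (l : Int) : (gOf bar l).keys.Nodup := by
  rw [gOf_eq_filter]
  exact PySem.Dict.nodup_keys_foldl_insert_key _ (keyOf l)
    (fun g p => g.getD (keyOf l p) 0 + p.2) _
    (by rw [PySem.Dict.keys_empty]; exact List.nodup_nil)

theorem gfold_bounds (l : Int) (hl : 1 ≤ l) :
    ∀ (L : List ((Int × Int) × Int)), (∀ p ∈ L, p.1.1 ≤ l ∧ p.1.2 ≥ 1) →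
    ∀ (g : PySem.Dict (Int × Int) Int),
      (∀ q ∈ g.items, 0 ≤ q.1.1 ∧ q.1.1 ≤ l ∧ 1 ≤ q.1.2 ∧ q.1.2 ≤ l) →
      ∀ q ∈ (L.foldl (fun g p => g.insert (keyOf l p) (g.getD (keyOf l p) 0 + p.2)) g).items,
        0 ≤ q.1.1 ∧ q.1.1 ≤ l ∧ 1 ≤ q.1.2 ∧ q.1.2 ≤ l := by
  intro L
  induction L with
  | nil => intro _ g hg; simpa using hg
  | cons p t ih =>
    intro hL g hg
    rw [List.foldl_cons]
    apply ih (fun p' hp' => hL p' (List.mem_cons_of_mem _ hp'))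
    intro q hq
    rcases (PySem.Dict.mem_items_insert _ _ _ _).1 hq with hq1 | ⟨hq2, -⟩
    · have hp := hL p (List.mem_cons_self ..)
      subst hq1
      simp only [keyOf]
      refine ⟨?_, ?_, ?_, ?_⟩ <;> omega
    · exact hg q hq2

theorem gOf_bounds (bar : List (Int × Int × Int)) (l : Int) (hl : 1 ≤ l) :
    ∀ p ∈ (gOf bar l).items, 0 ≤ p.1.1 ∧ p.1.1 ≤ l ∧ 1 ≤ p.1.2 ∧ p.1.2 ≤ l := by
  rw [gOf_eq_filter]
  refine gfold_bounds l hl _ ?_ PySem.Dict.empty (by simp [PySem.Dict.empty])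
  intro p hp
  have := (List.mem_filter.1 hp).2
  simpa using this

theorem wsum_cons (p : (Int × Int) × Int) (t : List ((Int × Int) × Int))
    (c : (Int × Int) → Bool) : wsum (p :: t) c = (if c p.1 then p.2 else 0) + wsum t c := by
  simp [wsum]

-- replacing the (unique) entry at key k by (k, nv) shifts a weighted sum by nv - w0
theorem wsum_subst (L : List ((Int × Int) × Int)) (k : Int × Int) (w0 nv : Int)
    (c : (Int × Int) → Bool) (hnd : (L.map Prod.fst).Nodup) (hm : (k, w0) ∈ L) :
    wsum (L.map (fun p => if (p.1 == k) = true then (k, nv) else p)) c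
      = wsum L c + (if c k then nv - w0 else 0) := by
  induction L with
  | nil => simp at hm
  | cons p t ih =>
    have hnd2 : p.1 ∉ t.map Prod.fst ∧ (t.map Prod.fst).Nodup := by
      rw [List.map_cons, List.nodup_cons] at hnd; exact hnd
    obtain ⟨hnin, hndt⟩ := hnd2
    by_cases hp : p.1 = k
    · have hq : p = (k, w0) := by
        rcases List.mem_cons.1 hm with h | h
        · exact h.symm
        · exact absurd (List.mem_map_of_mem h) (hp ▸ hnin)
      have htail : t.map (fun q => if (q.1 == k) = true then (k, nv) else q) = t := by
        have hid : ∀ q ∈ t, (if (q.1 == k) = true then (k, nv) else q) = q := by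
          intro q hqt
          have : q.1 ≠ k := fun hh => (hp ▸ hnin) (hh ▸ List.mem_map_of_mem hqt)
          simp [this]
        rw [List.map_congr_left hid]
        simp
      rw [List.map_cons, if_pos (by simp [hp]), htail, hq, wsum_cons, wsum_cons]
      by_cases hck : c k <;> simp [hck] <;> ring
    · have hm' : (k, w0) ∈ t := by
        rcases List.mem_cons.1 hm with h | h
        · exact absurd (congrArg Prod.fst h.symm) hp
        · exact h
      rw [List.map_cons, if_neg (by simp [hp]), wsum_cons, wsum_cons, ih hndt hm']
      ring

-- inserting `getD + v` shifts every weighted sum by the weight of the key times v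
theorem wsum_insert (d : PySem.Dict (Int × Int) Int) (hnd : d.keys.Nodup) (k : Int × Int)
    (v : Int) (c : (Int × Int) → Bool) :
    wsum ((d.insert k (d.getD k 0 + v)).items) c = wsum d.items c + (if c k then v else 0) := by
  by_cases hc : d.contains k = true
  · obtain ⟨w0, hw0⟩ : ∃ w0, d.get? k = some w0 := by
      rw [PySem.Dict.contains_eq_isSome_get?] at hc
      exact Option.isSome_iff_exists.1 hc
    have hmem : (k, w0) ∈ d.items := PySem.Dict.mem_items_of_get?_eq_some _ hw0
    have hgd : d.getD k 0 = w0 := PySem.Dict.getD_of_get?_eq_some _ 0 hw0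
    have hnd' : (d.items.map Prod.fst).Nodup := hnd
    rw [PySem.Dict.items_insert_of_contains _ _ hc, hgd,
      wsum_subst d.items k w0 (w0 + v) c hnd' hmem]
    by_cases hck : c k <;> simp [hck]
  · have hc' : d.contains k = false := by simpa using hc
    rw [PySem.Dict.items_insert_of_not_contains _ _ hc',
      PySem.Dict.getD_of_not_contains _ _ hc']
    simp only [wsum, List.map_append, List.sum_append, List.map_cons, List.map_nil,
      List.sum_cons, List.sum_nil]
    by_cases hck : c k <;> simp [hck]

theorem wsum_gfold (L : List ((Int × Int) × Int)) (l : Int) (c : (Int × Int) → Bool) :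
    ∀ (g : PySem.Dict (Int × Int) Int), g.keys.Nodup →
    wsum ((L.foldl (fun g p => g.insert (keyOf l p) (g.getD (keyOf l p) 0 + p.2)) g).items) c =
      wsum g.items c + (L.map (fun p => if c (keyOf l p) then p.2 else 0)).sum := by
  induction L with
  | nil => intro g _; simp
  | cons p t ih =>
    intro g hg
    rw [List.foldl_cons, ih _ (PySem.Dict.nodup_keys_insert _ _ _ hg),
      wsum_insert g hg (keyOf l p) p.2 c, List.map_cons, List.sum_cons]
    ring

theorem TT_eq_SS (bar : List (Int × Int × Int)) (l a b : Int)
    (ha : 0 ≤ a) (hal : a ≤ l) (hb : 1 ≤ b) (hbl : b ≤ l) :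
    TT bar l a b = SS bar a b := by
  rw [TT, gOf_eq_filter,
    wsum_gfold _ l _ PySem.Dict.empty (by rw [PySem.Dict.keys_empty]; exact List.nodup_nil)]
  have h0 : wsum PySem.Dict.empty.items (cellC a b) = 0 := by simp [wsum, PySem.Dict.empty]
  rw [h0, zero_add, SS, wsum, sum_map_filter_ite]
  have hpt : ∀ p : (Int × Int) × Int,
      (if (fun p : (Int × Int) × Int => decide (p.1.1 ≤ l ∧ p.1.2 ≥ 1)) p then
        (if cellC a b (keyOf l p) then p.2 else 0) else 0)
      = (if cellC a b p.1 then p.2 else 0) := by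
    intro p
    simp only [cellC, keyOf, decide_eq_true_eq, ge_iff_le]
    split_ifs <;> first | rfl | omega
  rw [funext hpt]

theorem TT_hi (bar : List (Int × Int × Int)) (l a b : Int) (hl : 1 ≤ l) (h : l < b) :
    TT bar l a b = 0 := by
  rw [TT, wsum]
  apply List.sum_eq_zero
  intro x hx
  obtain ⟨p, hp, rfl⟩ := List.mem_map.1 hx
  have hb := gOf_bounds bar l hl p hp
  rw [if_neg]
  simp only [cellC, decide_eq_true_eq, ge_iff_le]
  omega

theorem TT_lo (bar : List (Int × Int × Int)) (l a b : Int) (hl : 1 ≤ l) (h : a < 0) :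
    TT bar l a b = 0 := by
  rw [TT, wsum]
  apply List.sum_eq_zero
  intro x hx
  obtain ⟨p, hp, rfl⟩ := List.mem_map.1 hx
  have hb := gOf_bounds bar l hl p hp
  rw [if_neg]
  simp only [cellC, decide_eq_true_eq, ge_iff_le]
  omega

theorem wsum_keyeq_list (L : List ((Int × Int) × Int)) (q : Int × Int)
    (hnd : (L.map Prod.fst).Nodup) :
    wsum L (fun k => decide (k = q)) = (PySem.Dict.mk L).getD q 0 := by
  induction L with
  | nil => simp [wsum, PySem.Dict.getD, PySem.Dict.get?]
  | cons p t ih =>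
    obtain ⟨k0, v0⟩ := p
    have hnd2 : (k0, v0).1 ∉ t.map Prod.fst ∧ (t.map Prod.fst).Nodup := by
      rw [List.map_cons, List.nodup_cons] at hnd; exact hnd
    obtain ⟨hnin, hndt⟩ := hnd2
    have hget : (PySem.Dict.mk ((k0, v0) :: t)).getD q 0 =
        if (k0 == q) = true then v0 else (PySem.Dict.mk t).getD q 0 := by
      rw [PySem.Dict.getD_eq_get?_getD, PySem.Dict.get?_mk_cons]
      by_cases h : (k0 == q) = true <;> simp [h, PySem.Dict.getD_eq_get?_getD]
    rw [wsum_cons, hget]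
    by_cases h : k0 = q
    · rw [if_pos (by simp [h]), if_pos (by simp [h])]
      have hz : wsum t (fun k => decide (k = q)) = 0 := by
        apply List.sum_eq_zero
        intro x hx
        obtain ⟨p', hp', rfl⟩ := List.mem_map.1 hx
        have hne : p'.1 ≠ q := by
          intro hh
          apply hnin
          have hmm : p'.1 ∈ t.map Prod.fst := List.mem_map_of_mem (f := Prod.fst) hp'
          rw [hh] at hmm
          simpa [h] using hmm
        simp [hne]
      rw [hz, add_zero]
    · rw [if_neg (by simp [h]), if_neg (by simp [h]), zero_add]
      exact ih hndt

theorem wsum_keyeq (d : PySem.Dict (Int × Int) Int) (hnd : d.keys.Nodup) (q : Int × Int) :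
    wsum d.items (fun k => decide (k = q)) = d.getD q 0 := by
  obtain ⟨L⟩ := d
  exact wsum_keyeq_list L q hnd

-- pointwise inclusion–exclusion of the four rectangles plus the corner cell
theorem wsum_incl_excl (L : List ((Int × Int) × Int)) (a b : Int) :
    wsum L (cellC a b) = wsum L (fun k => decide (k = (a, b))) + wsum L (cellC a (b + 1))
      + wsum L (cellC (a - 1) b) - wsum L (cellC (a - 1) (b + 1)) := by
  induction L with
  | nil => simp [wsum]
  | cons p t ih =>
    obtain ⟨⟨x, y⟩, v⟩ := p
    rw [wsum_cons, wsum_cons, wsum_cons, wsum_cons, wsum_cons, ih]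
    have hpt : (if cellC a b (x, y) then v else 0) =
        (if decide ((x, y) = (a, b)) then v else 0) + (if cellC a (b + 1) (x, y) then v else 0)
        + (if cellC (a - 1) b (x, y) then v else 0)
        - (if cellC (a - 1) (b + 1) (x, y) then v else 0) := by
      simp only [cellC, Prod.mk.injEq, decide_eq_true_eq, ge_iff_le]
      split_ifs <;> omega
    linarith [hpt]

theorem TT_rec (bar : List (Int × Int × Int)) (l a b : Int) :
    TT bar l a b = (gOf bar l).getD (a, b) 0 + TT bar l a (b + 1) + TT bar l (a - 1) b
      - TT bar l (a - 1) (b + 1) := by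
  unfold TT
  rw [wsum_incl_excl _ a b, wsum_keyeq _ (gOf_nodup bar l) (a, b)]

-- loop invariant of B's cumulative fold: rows < A are fully summed, row A is summed from column C up
def Pinv (bar : List (Int × Int × Int)) (l A C : Int) (s : PySem.Dict (Int × Int) Int) : Prop :=
  ∀ x y : Int, s.getD (x, y) 0 =
    if (0 ≤ x ∧ x < A ∧ x < y ∧ y ≤ l) ∨ (x = A ∧ C ≤ y ∧ y ≤ l) then TT bar l x y else 0

theorem Pinv_shift (bar : List (Int × Int × Int)) (l A : Int) (hA : 0 ≤ A)
    (s : PySem.Dict (Int × Int) Int) (h : Pinv bar l A (A + 1) s) :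
    Pinv bar l (A + 1) (l + 1) s := by
  intro x y
  rw [h x y]
  refine if_congr ?_ rfl rfl
  constructor
  · rintro (⟨h1, h2, h3, h4⟩ | ⟨h1, h2, h3⟩)
    · exact Or.inl ⟨h1, by omega, h3, h4⟩
    · exact Or.inl ⟨by omega, by omega, by omega, h3⟩
  · rintro (⟨h1, h2, h3, h4⟩ | ⟨h1, h2, h3⟩)
    · rcases lt_or_ge x A with hxa | hxa
      · exact Or.inl ⟨h1, hxa, h3, h4⟩
      · exact Or.inr ⟨by omega, by omega, h4⟩
    · exact absurd h3 (by omega)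

theorem sInner_spec (bar : List (Int × Int × Int)) (l a : Int) (hl : 1 ≤ l) (ha : 0 ≤ a) :
    ∀ (n : Nat) (c : Int), c = a + n → c ≤ l →
    ∀ s, Pinv bar l a (c + 1) s →
    Pinv bar l a (a + 1) ((PySem.List.pyRange c a (-1)).foldl (fun s b =>
      s.insert (a, b) ((gOf bar l).getD (a, b) 0 + s.getD (a, b + 1) 0 + s.getD (a - 1, b) 0
        - s.getD (a - 1, b + 1) 0)) s) := by
  intro n
  induction n with
  | zero =>
    intro c hc hcl s hs
    have hca : c = a := by push_cast at hc; omega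
    subst hca
    rw [PySem.List.pyRange_neg_one_eq_nil (le_refl c)]
    simpa using hs
  | succ n ih =>
    intro c hc hcl s hs
    have hac : a < c := by push_cast at hc; omega
    rw [PySem.List.pyRange_neg_one_cons hac, List.foldl_cons]
    have hcc : c - 1 + 1 = c := by ring
    refine ih (c - 1) (by push_cast at hc ⊢; omega) (by omega) _ ?_
    rw [hcc]
    -- one insertion step establishes Pinv a c
    intro x y
    rw [PySem.Dict.getD_insert]
    by_cases hxy : (x, y) = (a, c)
    · obtain ⟨hx, hy⟩ : x = a ∧ y = c := by simpa [Prod.ext_iff] using hxy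
      subst hx; subst hy
      rw [if_pos hxy, if_pos (Or.inr ⟨rfl, le_refl _, hcl⟩)]
      have e1 : s.getD (x, y + 1) 0 = TT bar l x (y + 1) := by
        rw [hs x (y + 1)]
        by_cases h1 : y + 1 ≤ l
        · rw [if_pos (Or.inr ⟨rfl, le_refl _, h1⟩)]
        · rw [if_neg (by rintro (⟨_, _, _, _⟩ | ⟨_, _, _⟩) <;> omega),
            TT_hi bar l x (y + 1) hl (by omega)]
      have e2 : s.getD (x - 1, y) 0 = TT bar l (x - 1) y := by
        rw [hs (x - 1) y]
        by_cases h2 : 1 ≤ x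
        · rw [if_pos (Or.inl ⟨by omega, by omega, by omega, hcl⟩)]
        · rw [if_neg (by rintro (⟨_, _, _, _⟩ | ⟨_, _, _⟩) <;> omega),
            TT_lo bar l (x - 1) y hl (by omega)]
      have e3 : s.getD (x - 1, y + 1) 0 = TT bar l (x - 1) (y + 1) := by
        rw [hs (x - 1) (y + 1)]
        by_cases h2 : 1 ≤ x
        · by_cases h1 : y + 1 ≤ l
          · rw [if_pos (Or.inl ⟨by omega, by omega, by omega, h1⟩)]
          · rw [if_neg (by rintro (⟨_, _, _, _⟩ | ⟨_, _, _⟩) <;> omega),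
              TT_hi bar l (x - 1) (y + 1) hl (by omega)]
        · rw [if_neg (by rintro (⟨_, _, _, _⟩ | ⟨_, _, _⟩) <;> omega),
            TT_lo bar l (x - 1) (y + 1) hl (by omega)]
      rw [e1, e2, e3]
      exact (TT_rec bar l x y).symm
    · rw [if_neg hxy, hs x y]
      have hne : ¬(x = a ∧ y = c) := by simpa [Prod.ext_iff] using hxy
      refine if_congr ?_ rfl rfl
      constructor
      · rintro (⟨h1, h2, h3, h4⟩ | ⟨h1, h2, h3⟩)
        · exact Or.inl ⟨h1, h2, h3, h4⟩
        · exact Or.inr ⟨h1, by omega, h3⟩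
      · rintro (⟨h1, h2, h3, h4⟩ | ⟨h1, h2, h3⟩)
        · exact Or.inl ⟨h1, h2, h3, h4⟩
        · exact Or.inr ⟨h1, by omega, h3⟩

theorem sOuter_spec (bar : List (Int × Int × Int)) (l : Int) (hl : 1 ≤ l) :
    ∀ (n : Nat), (n : Int) ≤ l + 1 →
    Pinv bar l n (l + 1) ((PySem.List.pyRange 0 (n : Int) 1).foldl (fun s a =>
      (PySem.List.pyRange l a (-1)).foldl (fun s b =>
        s.insert (a, b) ((gOf bar l).getD (a, b) 0 + s.getD (a, b + 1) 0 + s.getD (a - 1, b) 0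
          - s.getD (a - 1, b + 1) 0)) s) PySem.Dict.empty) := by
  intro n
  induction n with
  | zero =>
    intro _
    rw [Nat.cast_zero, PySem.List.pyRange_one_eq_nil (le_refl 0), List.foldl_nil]
    intro x y
    rw [PySem.Dict.getD_empty, if_neg]
    rintro (⟨_, _, _, _⟩ | ⟨_, _, _⟩) <;> omega
  | succ n ih =>
    intro h
    have hn : ((n : Nat) : Int) ≤ l + 1 := by push_cast at h ⊢; omega
    have hnl : ((n : Nat) : Int) ≤ l := by push_cast at h; omega
    have hstep : PySem.List.pyRange 0 ((n + 1 : Nat) : Int) 1 =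
        PySem.List.pyRange 0 ((n : Nat) : Int) 1 ++ [((n : Nat) : Int)] := by
      push_cast
      exact PySem.List.pyRange_one_succ_right (by positivity)
    rw [hstep, List.foldl_append, List.foldl_cons, List.foldl_nil]
    have htn : ((l - (n : Nat)).toNat : Int) = l - (n : Nat) := Int.toNat_of_nonneg (by omega)
    have hres := sInner_spec bar l (n : Nat) hl (by positivity) (l - (n : Nat)).toNat l
      (by omega) (le_refl l) _ (ih hn)
    exact Pinv_shift bar l (n : Nat) (by positivity) _ hres

theorem sOf_getD (bar : List (Int × Int × Int)) (l : Int) (hl : 1 ≤ l) (a b : Int)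
    (ha : 0 ≤ a) (hab : a < b) (hbl : b ≤ l) :
    (sOf bar l).getD (a, b) 0 = SS bar a b := by
  have h0 : (0 : Int) ≤ l + 1 := by omega
  have hn : (((l + 1).toNat : Nat) : Int) = l + 1 := Int.toNat_of_nonneg h0
  have hout := sOuter_spec bar l hl (l + 1).toNat (by rw [hn])
  rw [hn] at hout
  rw [sOf, hout a b, if_pos (Or.inl ⟨ha, by omega, hab, hbl⟩)]
  exact TT_eq_SS bar l a b ha (by omega) (by omega) hbl

-- ===== VERDICT (by name: the statement is the Claim_ definition above) =====
theorem bar_to_rank_spec : Claim_equal_bar_to_rank := by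
  intro bar l _
  show bar_to_rank bar l = bar_to_rank_alt bar l
  rw [portA_eq, portB_eq, items_rOf, List.map_map]
  unfold pairsL
  rw [List.map_flatMap]
  apply List.flatMap_congr
  intro a ha
  rw [List.map_map]
  apply List.map_congr_left
  intro b hb
  obtain ⟨ha1, ha2⟩ := PySem.List.mem_pyRange_one.1 ha
  obtain ⟨hb1, hb2⟩ := PySem.List.mem_pyRange_one.1 hb
  have hl : (1 : Int) ≤ l := by omega
  simp only [Function.comp_apply]
  rw [sOf_getD bar l hl a b ha1 (by omega) (by omega)]
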